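-- pv_equiv track=rewrite | github.com/abdullahabdulsami2026-coder/healthcare-ai-portal | utils/clinical_calculators.py | classify_lipid
-- ===== SOURCE A (Python) =====
-- LIPID_CLASSES = {
--     "Total Cholesterol": [
--         (200, "Desirable", "#27ae60"),
--         (240, "Borderline High", "#f39c12"),
--         (9999, "High", "#e74c3c"),
--     ],
--     "LDL": [
--         (100, "Optimal", "#27ae60"),
--         (130, "Near Optimal", "#7dcea0"),
--         (160, "Borderline High", "#f39c12"),
--         (190, "High", "#e67e22"),
--         (9999, "Very High", "#e74c3c"),
--     ],
--     "HDL": "special",  # reversed — higher is better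
--     "Triglycerides": [
--         (150, "Normal", "#27ae60"),
--         (200, "Borderline High", "#f39c12"),
--         (500, "High", "#e67e22"),
--         (9999, "Very High", "#e74c3c"),
--     ],
-- }
--
-- def classify_lipid(name, value):
--     """Classify a lipid value. Returns (label, color)."""
--     if name == "HDL":
--         if value >= 60:
--             return "Optimal (Protective)", "#27ae60"
--         elif value >= 40:
--             return "Normal", "#7dcea0"
--         else:
--             return "Low (Risk Factor)", "#e74c3c"
--
--     thresholds = LIPID_CLASSES.get(name, [])
--     for cutoff, label, color in thresholds:
--         if value < cutoff:
--             return label, color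
--     return "Unknown", "#888"
-- ===== SOURCE B (Python) =====
-- LIPID_CLASSES = {
--     "Total Cholesterol": [
--         (200, "Desirable", "#27ae60"),
--         (240, "Borderline High", "#f39c12"),
--         (9999, "High", "#e74c3c"),
--     ],
--     "LDL": [
--         (100, "Optimal", "#27ae60"),
--         (130, "Near Optimal", "#7dcea0"),
--         (160, "Borderline High", "#f39c12"),
--         (190, "High", "#e67e22"),
--         (9999, "Very High", "#e74c3c"),
--     ],
--     "HDL": "special",  # reversed — higher is better
--     "Triglycerides": [
--         (150, "Normal", "#27ae60"),
--         (200, "Borderline High", "#f39c12"),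
--         (500, "High", "#e67e22"),
--         (9999, "Very High", "#e74c3c"),
--     ],
-- }
--
--
-- def _bisect_right(cutoffs, value):
--     """Index of the first cutoff strictly greater than value (binary search)."""
--     lo, hi = 0, len(cutoffs)
--     while lo < hi:
--         mid = (lo + hi) // 2
--         if value < cutoffs[mid]:
--             hi = mid
--         else:
--             lo = mid + 1
--     return lo
--
--
-- def classify_lipid(name, value):
--     """Classify a lipid value. Returns (label, color)."""
--     if name == "HDL":
--         if value >= 60:
--             return "Optimal (Protective)", "#27ae60"
--         elif value >= 40:
--             return "Normal", "#7dcea0"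
--         else:
--             return "Low (Risk Factor)", "#e74c3c"
--
--     thresholds = LIPID_CLASSES.get(name, [])
--     cutoffs = [c for c, _, _ in thresholds]
--     idx = _bisect_right(cutoffs, value)
--     if idx < len(thresholds):
--         _, label, color = thresholds[idx]
--         return label, color
--     return "Unknown", "#888"
-- ===== Notes on version B (the rewrite author's own statement) =====
-- stated objective: alternative
-- what changed: Replaces A's linear first-exceeding scan over the threshold tuples with a binary search (bisect_right) over the extracted sorted cutoffs, then a single index into the table.
import Mathlib
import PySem

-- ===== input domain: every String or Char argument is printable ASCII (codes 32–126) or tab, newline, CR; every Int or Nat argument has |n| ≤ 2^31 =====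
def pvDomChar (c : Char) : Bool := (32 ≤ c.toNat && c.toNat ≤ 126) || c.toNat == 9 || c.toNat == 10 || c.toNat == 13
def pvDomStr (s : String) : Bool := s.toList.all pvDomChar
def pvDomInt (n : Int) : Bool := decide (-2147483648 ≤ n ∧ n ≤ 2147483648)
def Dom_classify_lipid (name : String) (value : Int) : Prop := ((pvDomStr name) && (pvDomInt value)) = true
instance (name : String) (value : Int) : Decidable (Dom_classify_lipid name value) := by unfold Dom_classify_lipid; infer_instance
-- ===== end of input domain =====

-- B replaces A's linear first-exceeding scan with a binary search over the extracted cutoffs (alternative algorithm, same results).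

-- ===== PORT A =====
-- LIPID_CLASSES. The Python "HDL": "special" sentinel is never read (name == "HDL" returns before the
-- lookup), so the port's dict, uniformly typed as threshold lists, omits that key; behaviour is unchanged.
def lipidClasses : PySem.Dict String (List (Int × String × String)) :=
  PySem.Dict.ofList
    [ ("Total Cholesterol",
        [(200, "Desirable", "#27ae60"), (240, "Borderline High", "#f39c12"), (9999, "High", "#e74c3c")]),
      ("LDL",
        [(100, "Optimal", "#27ae60"), (130, "Near Optimal", "#7dcea0"), (160, "Borderline High", "#f39c12"),
         (190, "High", "#e67e22"), (9999, "Very High", "#e74c3c")]),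
      ("Triglycerides",
        [(150, "Normal", "#27ae60"), (200, "Borderline High", "#f39c12"), (500, "High", "#e67e22"),
         (9999, "Very High", "#e74c3c")]) ]

-- the 'for cutoff, label, color in thresholds: if value < cutoff: return label, color' loop
def scanThresholds : List (Int × String × String) → Int → String × String
  | [], _ => ("Unknown", "#888")
  | (cutoff, label, color) :: rest, value =>
      if value < cutoff then (label, color) else scanThresholds rest value

def classify_lipid (name : String) (value : Int) : String × String :=
  if name = "HDL" then
    if value ≥ 60 then ("Optimal (Protective)", "#27ae60")
    else if value ≥ 40 then ("Normal", "#7dcea0")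
    else ("Low (Risk Factor)", "#e74c3c")
  else
    scanThresholds (lipidClasses.getD name []) value

-- ===== PORT B =====
-- _bisect_right's while loop, made total with fuel = len(cutoffs)+1 (the loop never runs more often)
def bisectGo (cutoffs : List Int) (value : Int) : Nat → Int → Int → Int
  | 0, lo, _ => lo
  | fuel + 1, lo, hi =>
      if lo < hi then
        let mid := PySem.Int.floordiv (lo + hi) 2
        if value < PySem.List.pyGetD cutoffs mid 0 then bisectGo cutoffs value fuel lo mid
        else bisectGo cutoffs value fuel (mid + 1) hi
      else lo

def bisectRightB (cutoffs : List Int) (value : Int) : Int :=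
  bisectGo cutoffs value (cutoffs.length + 1) 0 (PySem.List.len cutoffs)

def classify_lipid_alt (name : String) (value : Int) : String × String :=
  if name = "HDL" then
    if value ≥ 60 then ("Optimal (Protective)", "#27ae60")
    else if value ≥ 40 then ("Normal", "#7dcea0")
    else ("Low (Risk Factor)", "#e74c3c")
  else
    let thresholds := lipidClasses.getD name []
    let cutoffs := thresholds.map (fun t => t.1)
    let idx := bisectRightB cutoffs value
    if idx < PySem.List.len thresholds then
      let t := PySem.List.pyGetD thresholds idx ((0 : Int), "", "")
      (t.2.1, t.2.2)
    else ("Unknown", "#888")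

-- ===== PRECONDITION & SPEC =====
def Spec_classify_lipid (name : String) (value : Int) (out : String × String) : Prop := out = classify_lipid_alt name value
instance (name : String) (value : Int) (out : String × String) : Decidable (Spec_classify_lipid name value out) := by unfold Spec_classify_lipid; infer_instance

-- ===== CLAIM (what is proved, stated in full; the proofs are below) =====
def Claim_equal_classify_lipid : Prop := ∀ (name : String) (value : Int), Dom_classify_lipid name value → Spec_classify_lipid name value (classify_lipid name value)

-- ===== LEMMAS AND PROOFS =====

-- B's generic-case computation, as a standalone function of the fetched threshold list (proof helper only)
def genericB (thresholds : List (Int × String × String)) (value : Int) : String × String :=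
  let cutoffs := thresholds.map (fun t => t.1)
  let idx := bisectRightB cutoffs value
  if idx < PySem.List.len thresholds then
    let t := PySem.List.pyGetD thresholds idx ((0 : Int), "", "")
    (t.2.1, t.2.2)
  else ("Unknown", "#888")

-- On each threshold list occurring in LIPID_CLASSES, linear scan and binary search agree for every value.
theorem agree_tc (v : Int) :
    scanThresholds [(200, "Desirable", "#27ae60"), (240, "Borderline High", "#f39c12"), (9999, "High", "#e74c3c")] v
      = genericB [(200, "Desirable", "#27ae60"), (240, "Borderline High", "#f39c12"), (9999, "High", "#e74c3c")] v := by
  simp only [genericB, bisectRightB, PySem.List.len, List.map, List.length]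
  norm_num
  simp [scanThresholds, bisectGo, PySem.List.pyGetD, PySem.List.pyGet?, PySem.List.pyIdx?]
  split_ifs <;> first | rfl | omega

theorem agree_ldl (v : Int) :
    scanThresholds [(100, "Optimal", "#27ae60"), (130, "Near Optimal", "#7dcea0"), (160, "Borderline High", "#f39c12"),
        (190, "High", "#e67e22"), (9999, "Very High", "#e74c3c")] v
      = genericB [(100, "Optimal", "#27ae60"), (130, "Near Optimal", "#7dcea0"), (160, "Borderline High", "#f39c12"),
        (190, "High", "#e67e22"), (9999, "Very High", "#e74c3c")] v := by
  simp only [genericB, bisectRightB, PySem.List.len, List.map, List.length]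
  norm_num
  simp [scanThresholds, bisectGo, PySem.List.pyGetD, PySem.List.pyGet?, PySem.List.pyIdx?]
  split_ifs <;> first | rfl | omega

theorem agree_tg (v : Int) :
    scanThresholds [(150, "Normal", "#27ae60"), (200, "Borderline High", "#f39c12"), (500, "High", "#e67e22"),
        (9999, "Very High", "#e74c3c")] v
      = genericB [(150, "Normal", "#27ae60"), (200, "Borderline High", "#f39c12"), (500, "High", "#e67e22"),
        (9999, "Very High", "#e74c3c")] v := by
  simp only [genericB, bisectRightB, PySem.List.len, List.map, List.length]
  norm_num
  simp [scanThresholds, bisectGo, PySem.List.pyGetD, PySem.List.pyGet?, PySem.List.pyIdx?]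
  split_ifs <;> first | rfl | omega

theorem agree_nil (v : Int) : scanThresholds [] v = genericB [] v := by
  simp [scanThresholds, genericB, bisectRightB, bisectGo, PySem.List.len]

-- classify_lipid_alt's generic branch IS genericB of the fetched list
theorem alt_eq_genericB (name : String) (value : Int) (h : ¬ name = "HDL") :
    classify_lipid_alt name value = genericB (lipidClasses.getD name []) value := by
  simp [classify_lipid_alt, genericB, h]

-- ===== VERDICT (by name: the statement is the Claim_ definition above) =====
theorem classify_lipid_spec : Claim_equal_classify_lipid := by
  intro name value _
  unfold Spec_classify_lipid
  by_cases hH : name = "HDL"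
  · simp [classify_lipid, classify_lipid_alt, hH]
  · rw [alt_eq_genericB name value hH]
    simp only [classify_lipid, if_neg hH]
    by_cases h1 : name = "Total Cholesterol"
    · subst h1
      rw [show lipidClasses.getD "Total Cholesterol" []
            = [(200, "Desirable", "#27ae60"), (240, "Borderline High", "#f39c12"), (9999, "High", "#e74c3c")]
          from by decide]
      exact agree_tc value
    by_cases h2 : name = "LDL"
    · subst h2
      rw [show lipidClasses.getD "LDL" []
            = [(100, "Optimal", "#27ae60"), (130, "Near Optimal", "#7dcea0"), (160, "Borderline High", "#f39c12"),
               (190, "High", "#e67e22"), (9999, "Very High", "#e74c3c")]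
          from by decide]
      exact agree_ldl value
    by_cases h3 : name = "Triglycerides"
    · subst h3
      rw [show lipidClasses.getD "Triglycerides" []
            = [(150, "Normal", "#27ae60"), (200, "Borderline High", "#f39c12"), (500, "High", "#e67e22"),
               (9999, "Very High", "#e74c3c")]
          from by decide]
      exact agree_tg value
    · have hc : lipidClasses.contains name = false := by
        rw [PySem.Dict.contains_eq_decide_mem_keys]
        rw [show lipidClasses.keys = ["Total Cholesterol", "LDL", "Triglycerides"] from by decide]
        simp [h1, h2, h3]
      rw [PySem.Dict.getD_of_not_contains lipidClasses [] hc]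
      exact agree_nil value
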